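-- pv_equiv track=rewrite | github.com/joetime/autolive | autolive/silence_detect.py | _merge_adjacent_ranges
-- ===== SOURCE A (Python) =====
-- from typing import List, Tuple
--
-- def _merge_adjacent_ranges(ranges: List[Tuple[int, int]], gap_ms: int) -> List[Tuple[int, int]]:
--     """Merge adjacent ranges with gaps smaller than gap_ms."""
--     if not ranges:
--         return []
--
--     merged = [ranges[0]]
--
--     for current_start, current_end in ranges[1:]:
--         last_start, last_end = merged[-1]
--
--         # If gap is small enough, merge
--         if current_start - last_end <= gap_ms:
--             merged[-1] = (last_start, current_end)
--         else:
--             merged.append((current_start, current_end))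
--
--     return merged
-- ===== SOURCE B (Python) =====
-- from typing import List, Tuple
--
-- def _merge_adjacent_ranges(ranges: List[Tuple[int, int]], gap_ms: int) -> List[Tuple[int, int]]:
--     """Merge adjacent ranges with gaps <= gap_ms by locating each maximal
--     mergeable run with an inner index scan and emitting one (start, end)
--     tuple per run; no running accumulator is maintained."""
--     out: List[Tuple[int, int]] = []
--     n = len(ranges)
--     i = 0
--     while i < n:
--         j = i
--         while j + 1 < n and ranges[j + 1][0] - ranges[j][1] <= gap_ms:
--             j += 1
--         out.append((ranges[i][0], ranges[j][1]))
--         i = j + 1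
--     return out
-- ===== Notes on version B (the rewrite author's own statement) =====
-- stated objective: alternative
-- what changed: B replaces A's accumulator-based merge pass (mutating merged[-1]) by a chunked two-level index scan: an inner scan finds the end j of each maximal run of ranges separated by gaps <= gap_ms, the outer loop emits (ranges[i].start, ranges[j].end) per run and jumps i to j+1; no merged segment is ever updated.
import Mathlib
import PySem

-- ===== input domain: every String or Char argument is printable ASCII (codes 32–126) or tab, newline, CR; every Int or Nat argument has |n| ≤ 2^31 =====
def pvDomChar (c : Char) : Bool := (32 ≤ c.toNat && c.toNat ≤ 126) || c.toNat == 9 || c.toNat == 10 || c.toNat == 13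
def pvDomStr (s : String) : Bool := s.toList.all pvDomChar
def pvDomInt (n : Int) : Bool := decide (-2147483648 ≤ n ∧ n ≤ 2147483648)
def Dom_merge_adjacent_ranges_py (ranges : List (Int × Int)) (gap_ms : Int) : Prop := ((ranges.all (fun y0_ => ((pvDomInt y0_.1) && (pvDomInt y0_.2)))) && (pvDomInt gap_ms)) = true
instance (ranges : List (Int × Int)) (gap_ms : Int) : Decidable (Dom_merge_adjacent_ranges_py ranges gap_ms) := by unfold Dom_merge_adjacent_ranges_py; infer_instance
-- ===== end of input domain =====

-- B locates each maximal mergeable run with an inner scan and emits one tuple per run,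
-- instead of A's accumulator pass updating merged[-1]; objective: alternative.


-- ===== PORT A =====
-- A's loop keeps `merged`; `merged[-1]` is tracked as the explicit (last_start, last_end)
-- argument, and completed segments are emitted in order.
def mergeLoopA (gap_ms : Int) : Int × Int → List (Int × Int) → List (Int × Int)
  | last, [] => [last]
  | (last_start, last_end), (current_start, current_end) :: rest =>
      if current_start - last_end ≤ gap_ms then
        mergeLoopA gap_ms (last_start, current_end) rest
      else
        (last_start, last_end) :: mergeLoopA gap_ms (current_start, current_end) rest

def merge_adjacent_ranges_py (ranges : List (Int × Int)) (gap_ms : Int) : List (Int × Int) :=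
  match ranges with
  | [] => []
  | r0 :: rest => mergeLoopA gap_ms r0 rest

-- ===== PORT B =====
-- Source B's inner `while j+1 < n and ranges[j+1][0] - ranges[j][1] <= gap_ms` scan:
-- `e` is ranges[j].end, the list is the suffix after j; returns the run's final end
-- and the suffix after the run (the position i = j+1 the outer loop jumps to).
def runScanB (gap_ms : Int) : Int → List (Int × Int) → Int × List (Int × Int)
  | e, [] => (e, [])
  | e, (cs, ce) :: t => if cs - e ≤ gap_ms then runScanB gap_ms ce t else (e, (cs, ce) :: t)

lemma runScanB_len (gap_ms : Int) : ∀ (e : Int) (l : List (Int × Int)),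
    (runScanB gap_ms e l).2.length ≤ l.length := by
  intro e l
  induction l generalizing e with
  | nil => simp [runScanB]
  | cons c t ih =>
      obtain ⟨cs, ce⟩ := c
      by_cases h : cs - e ≤ gap_ms
      · simpa [runScanB, h] using Nat.le_succ_of_le (ih ce)
      · simp [runScanB, h]

-- Source B's outer `while i < n` loop: emit (ranges[i].start, run end) and continue after the run.
def merge_adjacent_ranges_py_alt (ranges : List (Int × Int)) (gap_ms : Int) : List (Int × Int) :=
  match ranges with
  | [] => []
  | (s, e) :: t =>
      let p := runScanB gap_ms e t
      (s, p.1) :: merge_adjacent_ranges_py_alt p.2 gap_ms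
termination_by ranges.length
decreasing_by simpa using Nat.lt_succ_of_le (runScanB_len gap_ms e t)

-- ===== PRECONDITION & SPEC =====
def Spec_merge_adjacent_ranges_py (ranges : List (Int × Int)) (gap_ms : Int) (out : List (Int × Int)) : Prop := out = merge_adjacent_ranges_py_alt ranges gap_ms
instance (ranges : List (Int × Int)) (gap_ms : Int) (out : List (Int × Int)) : Decidable (Spec_merge_adjacent_ranges_py ranges gap_ms out) := by unfold Spec_merge_adjacent_ranges_py; infer_instance

-- ===== CLAIM (what is proved, stated in full; the proofs are below) =====
def Claim_equal_merge_adjacent_ranges_py : Prop := ∀ (ranges : List (Int × Int)) (gap_ms : Int), Dom_merge_adjacent_ranges_py ranges gap_ms → Spec_merge_adjacent_ranges_py ranges gap_ms (merge_adjacent_ranges_py ranges gap_ms)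

-- ===== LEMMAS AND PROOFS =====

-- A's accumulator loop emits exactly one segment per maximal run: its head is
-- (pending start, run's final end) and it continues on the suffix after the run.
lemma mergeLoopA_eq_alt (g : Int) (rest : List (Int × Int)) :
    ∀ (s e : Int), mergeLoopA g (s, e) rest =
      (s, (runScanB g e rest).1) :: merge_adjacent_ranges_py_alt (runScanB g e rest).2 g := by
  induction rest with
  | nil => intro s e; simp [mergeLoopA, runScanB, merge_adjacent_ranges_py_alt]
  | cons c t ih =>
      intro s e
      obtain ⟨cs, ce⟩ := c
      by_cases h : cs - e ≤ g
      · simpa [mergeLoopA, runScanB, h] using ih s ce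
      · rw [show mergeLoopA g (s, e) ((cs, ce) :: t)
              = (s, e) :: mergeLoopA g (cs, ce) t by simp [mergeLoopA, h],
            ih cs ce]
        simp [runScanB, h, merge_adjacent_ranges_py_alt]

-- ===== VERDICT (by name: the statement is the Claim_ definition above) =====
theorem merge_adjacent_ranges_py_spec : Claim_equal_merge_adjacent_ranges_py := by
  intro ranges gap_ms _
  unfold Spec_merge_adjacent_ranges_py
  match ranges with
  | [] => simp [merge_adjacent_ranges_py, merge_adjacent_ranges_py_alt]
  | (s, e) :: t =>
      rw [show merge_adjacent_ranges_py ((s, e) :: t) gap_ms = mergeLoopA gap_ms (s, e) t from rfl,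
          mergeLoopA_eq_alt gap_ms t s e]
      conv_rhs => rw [merge_adjacent_ranges_py_alt]
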